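-- pv_equiv track=rewrite | github.com/vanderduse/DSA | Array/count_subarray_with_fix_bounds.py | count_subarrays_max
-- ===== SOURCE A (Python) =====
-- def count_subarrays_max(nums, max_val):
--     count = 0
--     current_count = 0
--
--     for num in nums:
--         if num <= max_val:
--             current_count += 1
--         else:
--             current_count = 0
--         count += current_count
--
--     return count
-- ===== SOURCE B (Python) =====
-- def count_subarrays_max(nums, max_val):
--     total = 0
--     i = 0
--     n = len(nums)
--     while i < n:
--         j = i
--         while j < n and nums[j] <= max_val:
--             j += 1
--         run = j - i
--         total += run * (run + 1) // 2
--         i = j + 1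
--     return total
-- ===== Notes on version B (the rewrite author's own statement) =====
-- stated objective: alternative
-- what changed: B is an index-based two-level scan: an inner while finds the end of each maximal run of elements <= max_val and the whole run is added at once via the triangular closed form run*(run+1)//2, replacing A's for-each loop with a per-element running-count accumulator.
import Mathlib
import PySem

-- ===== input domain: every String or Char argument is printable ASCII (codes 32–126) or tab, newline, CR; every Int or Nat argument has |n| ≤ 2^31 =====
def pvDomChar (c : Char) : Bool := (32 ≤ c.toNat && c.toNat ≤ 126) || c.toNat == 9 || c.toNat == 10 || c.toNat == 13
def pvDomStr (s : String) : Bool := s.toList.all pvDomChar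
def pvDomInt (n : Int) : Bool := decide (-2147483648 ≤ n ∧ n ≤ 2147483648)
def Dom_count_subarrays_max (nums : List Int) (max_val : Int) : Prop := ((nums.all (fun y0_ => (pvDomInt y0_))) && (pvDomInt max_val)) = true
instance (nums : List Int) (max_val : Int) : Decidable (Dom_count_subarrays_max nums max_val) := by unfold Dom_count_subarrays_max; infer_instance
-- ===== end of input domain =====

-- B replaces A's per-element running-count accumulation by an index-based two-level
-- scan that adds each maximal run of elements ≤ max_val at once via run*(run+1)//2;
-- alternative decomposition, same cost.

-- ===== PORT A =====
-- A's loop body over state (count, current_count)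
def pvStepA (max_val : Int) (st : Int × Int) (num : Int) : Int × Int :=
  let current := if num ≤ max_val then st.2 + 1 else 0
  (st.1 + current, current)

def count_subarrays_max (nums : List Int) (max_val : Int) : Int :=
  (nums.foldl (pvStepA max_val) (0, 0)).1

-- ===== PORT B =====
-- inner while loop of B: advance j while j < n and nums[j] <= max_val; returns final j.
-- nums.getD j 0 is exact for Python nums[j] here since the guard gives 0 ≤ j < len(nums).
def pvRunEnd (nums : List Int) (max_val : Int) (j : Nat) : Nat :=
  if j < nums.length ∧ nums.getD j 0 ≤ max_val then pvRunEnd nums max_val (j + 1) else j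
termination_by nums.length - j
decreasing_by omega

-- termination helper for the outer loop: the inner while never moves j backwards
theorem pv_runEnd_ge (nums : List Int) (max_val : Int) (j : Nat) :
    j ≤ pvRunEnd nums max_val j := by
  fun_induction pvRunEnd <;> omega

-- outer while loop of B over state (total, i)
def pvOuter (nums : List Int) (max_val : Int) (total : Int) (i : Nat) : Int :=
  if i < nums.length then
    let j := pvRunEnd nums max_val i
    let run : Int := (j : Int) - (i : Int)
    pvOuter nums max_val (total + PySem.Int.floordiv (run * (run + 1)) 2) (j + 1)
  else total
termination_by nums.length - i
decreasing_by
  have := pv_runEnd_ge nums max_val i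
  omega

def count_subarrays_max_alt (nums : List Int) (max_val : Int) : Int :=
  pvOuter nums max_val 0 0

-- ===== PRECONDITION & SPEC =====
def Spec_count_subarrays_max (nums : List Int) (max_val : Int) (out : Int) : Prop := out = count_subarrays_max_alt nums max_val
instance (nums : List Int) (max_val : Int) (out : Int) : Decidable (Spec_count_subarrays_max nums max_val out) := by unfold Spec_count_subarrays_max; infer_instance

-- ===== CLAIM (what is proved, stated in full; the proofs are below) =====
def Claim_equal_count_subarrays_max : Prop := ∀ (nums : List Int) (max_val : Int), Dom_count_subarrays_max nums max_val → Spec_count_subarrays_max nums max_val (count_subarrays_max nums max_val)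

-- ===== LEMMAS AND PROOFS =====

-- triangular numbers, recursively
def pvTri : Nat → Int
  | 0 => 0
  | k + 1 => pvTri k + (k + 1)

-- T(r+1) = T(r) + (r+1) for the floordiv closed form
theorem pv_tri_step (r : Int) :
    PySem.Int.floordiv ((r + 1) * (r + 1 + 1)) 2
      = PySem.Int.floordiv (r * (r + 1)) 2 + (r + 1) := by
  rw [PySem.Int.floordiv_eq_ediv_of_pos (by norm_num),
      PySem.Int.floordiv_eq_ediv_of_pos (by norm_num)]
  have h : (r + 1) * (r + 1 + 1) = r * (r + 1) + (r + 1) * 2 := by ring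
  rw [h, Int.add_mul_ediv_right _ _ (by norm_num)]

theorem pv_tri_floordiv (k : Nat) :
    pvTri k = PySem.Int.floordiv ((k : Int) * ((k : Int) + 1)) 2 := by
  induction k with
  | zero => decide
  | succ k ih =>
      have := pv_tri_step (k : Int)
      push_cast [pvTri]
      push_cast at ih
      omega

-- A's fold is affine in the accumulated count
theorem pv_shift (max_val : Int) : ∀ (ns : List Int) (t r : Int),
    List.foldl (pvStepA max_val) (t, r) ns
      = (t + (List.foldl (pvStepA max_val) (0, r) ns).1,
         (List.foldl (pvStepA max_val) (0, r) ns).2) := by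
  intro ns
  induction ns with
  | nil => intro t r; simp
  | cons x ns ih =>
    intro t r
    simp only [List.foldl_cons, pvStepA]
    rw [ih (t + if x ≤ max_val then r + 1 else 0) (if x ≤ max_val then r + 1 else 0),
        ih (0 + if x ≤ max_val then r + 1 else 0) (if x ≤ max_val then r + 1 else 0)]
    simp only [Prod.mk.injEq]
    constructor
    · ring
    · trivial

-- A's fold over a run of valid elements
theorem pv_run (max_val : Int) : ∀ (pre : List Int) (t r : Int),
    (∀ x ∈ pre, x ≤ max_val) →
    List.foldl (pvStepA max_val) (t, r) pre
      = (t + (pre.length : Int) * r + pvTri pre.length, r + pre.length) := by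
  intro pre
  induction pre with
  | nil => intro t r _; simp [pvTri]
  | cons x pre ih =>
    intro t r hall
    have hx : x ≤ max_val := hall x (by simp)
    simp only [List.foldl_cons, pvStepA, hx, if_pos]
    rw [ih (t + (r + 1)) (r + 1) (fun y hy => hall y (by simp [hy]))]
    have htri : pvTri (pre.length + 1) = pvTri pre.length + ((pre.length : Int) + 1) := by
      simp [pvTri]
    simp only [Prod.mk.injEq, List.length_cons]
    constructor
    · push_cast [htri]
      ring
    · push_cast
      ring

-- the inner while ends exactly at the takeWhile boundary
theorem pv_runEnd_eq (nums : List Int) (max_val : Int) (i : Nat) :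
    pvRunEnd nums max_val i
      = i + ((nums.drop i).takeWhile (fun x => decide (x ≤ max_val))).length := by
  fun_induction pvRunEnd with
  | case1 j h ih =>
      obtain ⟨hj, hv⟩ := h
      rw [ih, List.drop_eq_getElem_cons hj, List.takeWhile_cons]
      have hg : nums.getD j 0 = nums[j] := List.getD_eq_getElem nums 0 hj
      have hd : decide (nums[j] ≤ max_val) = true := by
        rw [← hg]; exact decide_eq_true hv
      simp only [hd, if_true, List.length_cons]
      omega
  | case2 j h =>
      by_cases hj : j < nums.length
      · have hv : ¬ nums.getD j 0 ≤ max_val := fun c => h ⟨hj, c⟩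
        rw [List.drop_eq_getElem_cons hj, List.takeWhile_cons]
        have hg : nums.getD j 0 = nums[j] := List.getD_eq_getElem nums 0 hj
        have hd : decide (nums[j] ≤ max_val) = false := by
          rw [← hg]; exact decide_eq_false hv
        simp [hd]
      · rw [List.drop_eq_nil_of_le (by omega)]
        simp

-- main loop correspondence: B's outer loop computes A's fold on the remaining suffix
theorem pv_outer_eq (nums : List Int) (max_val : Int) : ∀ (d i : Nat) (total : Int),
    nums.length - i ≤ d →
    pvOuter nums max_val total i
      = total + (List.foldl (pvStepA max_val) (0, 0) (nums.drop i)).1 := by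
  intro d
  induction d with
  | zero =>
    intro i total h
    rw [pvOuter]
    rw [if_neg (by omega), List.drop_eq_nil_of_le (by omega)]
    simp
  | succ d ih =>
    intro i total h
    rw [pvOuter]
    by_cases hi : i < nums.length
    · rw [if_pos hi]
      set p : Int → Bool := fun x => decide (x ≤ max_val) with hp
      set L := nums.drop i with hL
      set k := (L.takeWhile p).length with hk
      have hj : pvRunEnd nums max_val i = i + k := pv_runEnd_eq nums max_val i
      have hkle : k ≤ L.length := by
        rw [hk]; exact (List.takeWhile_sublist p).length_le
      have hLlen : L.length = nums.length - i := by rw [hL]; exact List.length_drop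
      -- the recursive call via IH
      have hrec : pvOuter nums max_val
            (total + PySem.Int.floordiv
              (((pvRunEnd nums max_val i : Int) - (i : Int)) *
               (((pvRunEnd nums max_val i : Int) - (i : Int)) + 1)) 2)
            (pvRunEnd nums max_val i + 1)
          = (total + PySem.Int.floordiv
              (((pvRunEnd nums max_val i : Int) - (i : Int)) *
               (((pvRunEnd nums max_val i : Int) - (i : Int)) + 1)) 2)
            + (List.foldl (pvStepA max_val) (0, 0) (nums.drop (pvRunEnd nums max_val i + 1))).1 := by
        apply ih
        omega
      rw [hrec]
      have hcast : ((pvRunEnd nums max_val i : Int) - (i : Int)) = (k : Int) := by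
        rw [hj]; push_cast; ring
      rw [hcast, ← pv_tri_floordiv k]
      -- decompose the suffix
      have hsplit : L = L.takeWhile p ++ L.dropWhile p := (List.takeWhile_append_dropWhile).symm
      have hdropj : nums.drop (pvRunEnd nums max_val i + 1) = (L.dropWhile p).drop 1 := by
        have h1 : ((nums.drop i).drop k).drop 1 = nums.drop (i + k + 1) := by
          rw [List.drop_drop, List.drop_drop]
          congr 1
        rw [hj, ← h1, ← hL]
        congr 1
        conv_lhs => rw [hsplit]
        rw [hk, List.drop_left]
      have hall : ∀ x ∈ L.takeWhile p, x ≤ max_val := by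
        intro x hx
        have := List.mem_takeWhile_imp hx
        simpa [hp] using this
      have hfold : (List.foldl (pvStepA max_val) (0, 0) L).1
          = pvTri k + (List.foldl (pvStepA max_val) (0, 0) ((L.dropWhile p).drop 1)).1 := by
        conv_lhs => rw [hsplit]
        rw [List.foldl_append, pv_run max_val _ 0 0 hall, ← hk]
        have h00 : ((0 : Int) + (k : Int) * 0 + pvTri k, (0 : Int) + (k : Int)) = (pvTri k, (k : Int)) := by
          norm_num
        rw [h00]
        -- the first element of dropWhile (if any) fails the predicate and resets the run
        cases hD : L.dropWhile p with
        | nil => simp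
        | cons b rest =>
          have hb : p b = false := by
            have := List.head?_dropWhile_not p L
            rw [hD] at this
            simpa using this
          have hb' : ¬ b ≤ max_val := by simpa [hp] using hb
          simp only [List.foldl_cons, pvStepA, hb', ite_false, List.drop_one]
          rw [pv_shift max_val rest (pvTri k + 0) 0]
          simp
      rw [hdropj, hfold]
      ring
    · rw [if_neg hi, List.drop_eq_nil_of_le (by omega)]
      simp

-- ===== VERDICT (by name: the statement is the Claim_ definition above) =====
theorem count_subarrays_max_spec : Claim_equal_count_subarrays_max := by
  intro nums max_val _
  unfold Spec_count_subarrays_max count_subarrays_max count_subarrays_max_alt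
  have h := pv_outer_eq nums max_val nums.length 0 0 (by omega)
  simpa using h.symm
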